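-- pv_equiv track=rewrite | github.com/hassonlab/podcast-benchmark | utils/atlas_utils.py | group_electrodes_by_region
-- ===== SOURCE A (Python) =====
-- def group_electrodes_by_region(
--     elec_names: list[str],
--     atlas_labels: list[str],
--     region_groups: dict[str, list[str]],
-- ) -> dict[str, list[str]]:
--     label_to_region: dict[str, str] = {}
--     for region_name, labels in region_groups.items():
--         for label in labels:
--             label_to_region[label] = region_name
--
--     result: dict[str, list[str]] = {}
--     for elec_name, label in zip(elec_names, atlas_labels):
--         region_name = label_to_region.get(label)
--         if region_name is not None:
--             result.setdefault(region_name, []).append(elec_name)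
--
--     return result
-- ===== SOURCE B (Python) =====
-- def group_electrodes_by_region(
--     elec_names: list[str],
--     atlas_labels: list[str],
--     region_groups: dict[str, list[str]],
-- ) -> dict[str, list[str]]:
--     # No inverted label->region index: for each electrode, scan the region
--     # groups directly, keeping the LAST region whose label list contains the
--     # electrode's label (matching dict overwrite semantics of the index).
--     result: dict[str, list[str]] = {}
--     for elec_name, label in zip(elec_names, atlas_labels):
--         region = None
--         for region_name, labels in region_groups.items():
--             if label in labels:
--                 region = region_name
--         if region is not None:
--             result.setdefault(region, []).append(elec_name)
--     return result
-- ===== Notes on version B (the rewrite author's own statement) =====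
-- stated objective: alternative
-- what changed: Drops the precomputed inverted label-to-region dictionary; instead each electrode's label is resolved by a direct last-match scan over region_groups.items().
import Mathlib
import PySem

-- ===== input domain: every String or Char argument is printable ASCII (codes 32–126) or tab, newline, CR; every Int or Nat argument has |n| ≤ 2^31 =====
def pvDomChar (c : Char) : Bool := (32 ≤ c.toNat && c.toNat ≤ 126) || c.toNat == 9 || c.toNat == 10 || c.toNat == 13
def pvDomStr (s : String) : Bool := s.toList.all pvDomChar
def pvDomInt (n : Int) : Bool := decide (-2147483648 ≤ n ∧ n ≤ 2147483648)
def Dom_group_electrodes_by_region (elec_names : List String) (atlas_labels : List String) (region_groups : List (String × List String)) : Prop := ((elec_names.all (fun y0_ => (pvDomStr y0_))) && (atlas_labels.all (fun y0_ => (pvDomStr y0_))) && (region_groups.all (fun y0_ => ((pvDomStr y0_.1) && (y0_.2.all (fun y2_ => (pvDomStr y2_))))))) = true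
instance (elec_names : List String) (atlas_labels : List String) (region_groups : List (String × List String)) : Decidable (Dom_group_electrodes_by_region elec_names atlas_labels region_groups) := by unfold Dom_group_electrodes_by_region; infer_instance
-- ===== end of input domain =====

-- ===== PORT A =====
-- Transliteration of A: build the inverted label->region dict, then one pass over
-- zip(elec_names, atlas_labels) doing result.setdefault(rn, []).append(en)
-- (= Dict.modify rn [] (· ++ [en]), exactly Python's setdefault-then-append effect).
def group_electrodes_by_region (elec_names : List String) (atlas_labels : List String) (region_groups : List (String × List String)) : List (String × List String) :=
  let label_to_region : PySem.Dict String String :=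
    region_groups.foldl (fun d p => p.2.foldl (fun d label => d.insert label p.1) d) PySem.Dict.empty
  let result : PySem.Dict String (List String) :=
    (elec_names.zip atlas_labels).foldl (fun r q =>
      match label_to_region.get? q.2 with
      | some rn => r.modify rn [] (· ++ [q.1])
      | none => r) PySem.Dict.empty
  result.items

-- ===== PORT B =====
-- Transliteration of B: per electrode, a direct last-match scan over region_groups.
def group_electrodes_by_region_alt (elec_names : List String) (atlas_labels : List String) (region_groups : List (String × List String)) : List (String × List String) :=
  ((elec_names.zip atlas_labels).foldl (fun r q =>
      match region_groups.foldl (fun acc p => if q.2 ∈ p.2 then some p.1 else acc) (none : Option String) with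
      | some rn => r.modify rn [] (· ++ [q.1])
      | none => r) PySem.Dict.empty).items

-- ===== PRECONDITION & SPEC =====
def Spec_group_electrodes_by_region (elec_names : List String) (atlas_labels : List String) (region_groups : List (String × List String)) (out : List (String × List String)) : Prop := out = group_electrodes_by_region_alt elec_names atlas_labels region_groups
instance (elec_names : List String) (atlas_labels : List String) (region_groups : List (String × List String)) (out : List (String × List String)) : Decidable (Spec_group_electrodes_by_region elec_names atlas_labels region_groups out) := by unfold Spec_group_electrodes_by_region; infer_instance

-- ===== CLAIM (what is proved, stated in full; the proofs are below) =====
def Claim_equal_group_electrodes_by_region : Prop := ∀ (elec_names : List String) (atlas_labels : List String) (region_groups : List (String × List String)), Dom_group_electrodes_by_region elec_names atlas_labels region_groups → Spec_group_electrodes_by_region elec_names atlas_labels region_groups (group_electrodes_by_region elec_names atlas_labels region_groups)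

-- ===== LEMMAS AND PROOFS =====

-- ===== VERDICT (by name: the statement is the Claim_ definition above) =====
lemma lookup_inner (labels : List String) (rn : String) (d : PySem.Dict String String) (lb : String) :
    (labels.foldl (fun d l => d.insert l rn) d).get? lb
      = if lb ∈ labels then some rn else d.get? lb := by
  induction labels generalizing d with
  | nil => simp
  | cons l rest ih =>
      simp only [List.foldl_cons, ih, PySem.Dict.get?_insert, List.mem_cons]
      split_ifs <;> simp_all

lemma lookup_outer (rgs : List (String × List String)) (lb : String) (d : PySem.Dict String String) :
    (rgs.foldl (fun d p => p.2.foldl (fun d label => d.insert label p.1) d) d).get? lb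
      = rgs.foldl (fun acc p => if lb ∈ p.2 then some p.1 else acc) (d.get? lb) := by
  induction rgs generalizing d with
  | nil => rfl
  | cons p rest ih =>
      simp only [List.foldl_cons, ih, lookup_inner]

theorem group_electrodes_by_region_spec : Claim_equal_group_electrodes_by_region := by
  intro elec_names atlas_labels region_groups _
  unfold Spec_group_electrodes_by_region
  unfold group_electrodes_by_region group_electrodes_by_region_alt
  have hstep :
      (fun (r : PySem.Dict String (List String)) (q : String × String) =>
        match (region_groups.foldl
            (fun d p => p.2.foldl (fun d label => d.insert label p.1) d)
            PySem.Dict.empty).get? q.2 with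
        | some rn => r.modify rn [] (· ++ [q.1])
        | none => r)
      = (fun (r : PySem.Dict String (List String)) (q : String × String) =>
        match region_groups.foldl (fun acc p => if q.2 ∈ p.2 then some p.1 else acc)
            (none : Option String) with
        | some rn => r.modify rn [] (· ++ [q.1])
        | none => r) := by
    funext r q
    rw [lookup_outer, PySem.Dict.get?_empty]
  simp only [hstep]
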